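-- pv_equiv track=rewrite | github.com/cosmosZhou/sympy | sympy/matrices/expressions/matexpr.py | simplify_shape
-- ===== SOURCE A (Python) =====
-- def simplify_shape(shape):
--     while shape:
--         if shape[0] == 1:
--             shape = shape[1:]
--         elif shape[-1] == 1:
--             shape = shape[:-1]
--         else:
--             break
--
--     return shape
-- ===== SOURCE B (Python) =====
-- def simplify_shape(shape):
--     i = 0
--     n = len(shape)
--     while i < n and shape[i] == 1:
--         i += 1
--     j = n
--     while j > i and shape[j - 1] == 1:
--         j -= 1
--     return shape[i:j]
-- ===== Notes on version B (the rewrite author's own statement) =====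
-- stated objective: alternative
-- what changed: B replaces A's while loop that repeatedly re-slices the tuple with a two-pointer scan computing the trim bounds and one final slice.
import Mathlib
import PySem

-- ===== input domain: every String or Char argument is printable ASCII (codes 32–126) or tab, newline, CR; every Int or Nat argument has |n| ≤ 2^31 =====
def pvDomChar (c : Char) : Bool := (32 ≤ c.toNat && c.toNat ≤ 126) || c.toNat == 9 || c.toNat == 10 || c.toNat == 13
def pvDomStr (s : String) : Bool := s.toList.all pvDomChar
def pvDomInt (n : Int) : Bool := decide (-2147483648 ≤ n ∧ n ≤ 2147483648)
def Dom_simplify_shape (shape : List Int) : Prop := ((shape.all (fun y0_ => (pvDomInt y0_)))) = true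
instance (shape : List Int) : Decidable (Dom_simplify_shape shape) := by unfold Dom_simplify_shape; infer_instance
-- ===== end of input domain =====

-- B replaces A's repeated-slicing while loop with a two-pointer scan and one final slice (alternative decomposition, same observable result).


-- ===== PORT A =====
-- A's while loop: strip shape[0]==1 (slice shape[1:] = tail) else strip shape[-1]==1
-- (slice shape[:-1] = dropLast; shape[-1] on a nonempty list = getLast?) else break.
def simplify_shape (shape : List Int) : List Int :=
  match shape with
  | [] => []
  | x :: xs =>
    if x = 1 then simplify_shape xs
    else if (x :: xs).getLast? = some 1 then simplify_shape ((x :: xs).dropLast)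
    else x :: xs
termination_by shape.length
decreasing_by
  · simp
  · simp

-- ===== PORT B =====
-- first while loop of Source B: advance i while i < n and shape[i] == 1 (i counts leading ones)
def pvFrontIdx : List Int → Nat
  | [] => 0
  | x :: xs => if x = 1 then pvFrontIdx xs + 1 else 0

-- second while loop of Source B on core = shape[i:]: decrement j while j > i and shape[j-1] == 1;
-- here m is the current j measured from the front of core (core.getD (m) 0 = shape[j-1]).
def pvBackLen (core : List Int) : Nat → Nat
  | 0 => 0
  | m + 1 => if core.getD m 0 = 1 then pvBackLen core m else m + 1

-- Source B: the final single slice shape[i:j] = (shape.drop i).take (j - i)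
def simplify_shape_alt (shape : List Int) : List Int :=
  let core := shape.drop (pvFrontIdx shape)
  core.take (pvBackLen core core.length)

-- ===== PRECONDITION & SPEC =====
def Spec_simplify_shape (shape : List Int) (out : List Int) : Prop := out = simplify_shape_alt shape
instance (shape : List Int) (out : List Int) : Decidable (Spec_simplify_shape shape out) := by unfold Spec_simplify_shape; infer_instance

-- ===== CLAIM (what is proved, stated in full; the proofs are below) =====
def Claim_equal_simplify_shape : Prop := ∀ (shape : List Int), Dom_simplify_shape shape → Spec_simplify_shape shape (simplify_shape shape)

-- ===== LEMMAS AND PROOFS =====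

theorem pvBackLen_le (core : List Int) (m : Nat) : pvBackLen core m ≤ m := by
  induction m with
  | zero => simp [pvBackLen]
  | succ m ih =>
    unfold pvBackLen
    split
    · exact Nat.le_trans ih (Nat.le_succ m)
    · exact Nat.le_refl _

theorem pvBackLen_succ (core : List Int) (m : Nat) :
    pvBackLen core (m + 1) = if core.getD m 0 = 1 then pvBackLen core m else m + 1 := rfl

theorem pvBackLen_congr (core core' : List Int) (m : Nat)
    (h : ∀ k, k < m → core.getD k 0 = core'.getD k 0) :
    pvBackLen core m = pvBackLen core' m := by
  induction m with
  | zero => rfl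
  | succ m ih =>
    unfold pvBackLen
    rw [h m (Nat.lt_succ_self m)]
    split
    · exact ih (fun k hk => h k (Nat.lt_succ_of_lt hk))
    · rfl

theorem alt_cons_one (xs : List Int) : simplify_shape_alt (1 :: xs) = simplify_shape_alt xs := by
  simp [simplify_shape_alt, pvFrontIdx]

theorem getD_dropLast (l : List Int) (k : Nat) (hk : k < l.dropLast.length) :
    l.dropLast.getD k 0 = l.getD k 0 := by
  have hk' : k < l.length := lt_of_lt_of_le hk (by simp)
  rw [List.getD_eq_getElem l 0 hk', List.getD_eq_getElem _ 0 hk]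
  exact List.getElem_dropLast hk

theorem take_dropLast_eq (l : List Int) (j : Nat) (hj : j ≤ l.length - 1) :
    l.dropLast.take j = l.take j := by
  rw [List.dropLast_eq_take, List.take_take]
  congr 1
  omega

theorem alt_dropLast (s : List Int) (hne : s ≠ []) (hhead : s.getD 0 0 ≠ 1)
    (hlast : s.getLast? = some 1) : simplify_shape_alt s = simplify_shape_alt s.dropLast := by
  obtain ⟨x, xs, rfl⟩ := List.exists_cons_of_ne_nil hne
  have hx : x ≠ 1 := by simp at hhead; exact hhead
  -- s nonempty with last = 1 and head ≠ 1 forces xs ≠ []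
  have hxs : xs ≠ [] := by
    rintro rfl
    simp [List.getLast?] at hlast
    exact hx hlast
  have hdl : (x :: xs).dropLast = x :: xs.dropLast := by
    cases xs with
    | nil => exact absurd rfl hxs
    | cons y ys => simp
  have hfront : pvFrontIdx (x :: xs) = 0 := by simp [pvFrontIdx, hx]
  have hfront' : pvFrontIdx ((x :: xs).dropLast) = 0 := by
    rw [hdl]; simp [pvFrontIdx, hx]
  have hlen : (x :: xs).length = (x :: xs).dropLast.length + 1 := by
    simp [List.length_dropLast]
  have hgetlast : (x :: xs).getD ((x :: xs).dropLast.length) 0 = 1 := by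
    have hlt : (x :: xs).dropLast.length < (x :: xs).length := by omega
    rw [List.getD_eq_getElem _ 0 hlt]
    have := List.getLast_eq_getElem (l := x :: xs) (by simp)
    have h2 : (x :: xs).getLast (by simp) = 1 := by
      have := List.getLast?_eq_some_getLast (l := x :: xs) (by simp)
      rw [this] at hlast
      exact Option.some.inj hlast
    rw [← h2, this]
    congr 1
    simp [List.length_dropLast]
  simp only [simplify_shape_alt, hfront, hfront', List.drop_zero]
  set m := (x :: xs).dropLast.length with hm
  have hb : pvBackLen (x :: xs) (x :: xs).length = pvBackLen ((x :: xs).dropLast) m := by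
    rw [hlen, pvBackLen_succ, hgetlast, if_pos rfl]
    exact pvBackLen_congr _ _ m (fun k hk => (getD_dropLast (x :: xs) k (hm ▸ hk)).symm)
  rw [hb]
  -- taking ≤ m elements agrees between the list and its dropLast
  exact (take_dropLast_eq (x :: xs) _
    (by have := pvBackLen_le ((x :: xs).dropLast) m; omega)).symm

theorem alt_fixed (s : List Int) (hne : s ≠ []) (hhead : s.getD 0 0 ≠ 1)
    (hlast : s.getLast? ≠ some 1) : simplify_shape_alt s = s := by
  obtain ⟨x, xs, rfl⟩ := List.exists_cons_of_ne_nil hne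
  have hx : x ≠ 1 := by simp at hhead; exact hhead
  have hfront : pvFrontIdx (x :: xs) = 0 := by simp [pvFrontIdx, hx]
  have hlen : (x :: xs).length = xs.length + 1 := by simp
  have hgetlast : (x :: xs).getD (xs.length) 0 ≠ 1 := by
    have hlt : xs.length < (x :: xs).length := by simp
    rw [List.getD_eq_getElem _ 0 hlt]
    intro h
    apply hlast
    have h2 := List.getLast?_eq_some_getLast (l := x :: xs) (by simp)
    rw [h2, List.getLast_eq_getElem (l := x :: xs) (by simp)]
    simp [h]
  simp only [simplify_shape_alt, hfront, List.drop_zero, hlen]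
  rw [pvBackLen_succ, if_neg hgetlast]
  exact List.take_of_length_le (by simp)

theorem a_eq_alt (s : List Int) : simplify_shape s = simplify_shape_alt s := by
  induction hn : s.length using Nat.strong_induction_on generalizing s with
  | _ n ih =>
  subst hn
  match s with
  | [] => simp [simplify_shape, simplify_shape_alt, pvFrontIdx, pvBackLen]
  | x :: xs =>
    unfold simplify_shape
    by_cases hx : x = 1
    · subst hx
      rw [if_pos rfl, alt_cons_one]
      exact ih xs.length (by simp) xs rfl
    · rw [if_neg hx]
      have hhead : (x :: xs).getD 0 0 ≠ 1 := by simpa using hx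
      by_cases hlast : (x :: xs).getLast? = some 1
      · rw [if_pos hlast, alt_dropLast (x :: xs) (by simp) hhead hlast]
        exact ih (x :: xs).dropLast.length (by simp) _ rfl
      · rw [if_neg hlast, alt_fixed (x :: xs) (by simp) hhead hlast]

-- ===== VERDICT (by name: the statement is the Claim_ definition above) =====
theorem simplify_shape_spec : Claim_equal_simplify_shape := by
  intro shape _
  unfold Spec_simplify_shape
  exact a_eq_alt shape
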